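-- pv_equiv track=rewrite | github.com/starkof/AshesiHackerLeague-starkof | joker.py | joker
-- ===== SOURCE A (Python) =====
-- def is_int(ch):
--     try:
--         int(ch)
--         return True
--     except ValueError:
--         return False
--
-- def joker(string):
--     ints = []
--     buffer = ''
--     qcount = 0
--
--     for i in string:
--         buffer += i
--         if is_int(i):
--             ints.append(int(i))
--         elif i == '?':
--             qcount += 1
--
--         if len(ints) == 2:
--             if sum(ints) == 10:
--                 if qcount == 3:
--                     return True
--             ints = []
--             buffer = ''
--             qcount = 0
--
--     return False
-- ===== SOURCE B (Python) =====
-- def _digitlike(ch):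
--     try:
--         int(ch)
--         return True
--     except ValueError:
--         return False
--
--
-- def joker(string):
--     digits = [(i, int(c)) for i, c in enumerate(string) if _digitlike(c)]
--     boundary = 0
--     it = iter(digits)
--     for (_, d1), (p2, d2) in zip(it, it):
--         if d1 + d2 == 10 and string[boundary:p2].count('?') == 3:
--             return True
--         boundary = p2 + 1
--     return False
-- ===== Notes on version B (the rewrite author's own statement) =====
-- stated objective: alternative
-- what changed: Replaces A's single-pass state machine (running ints/buffer/qcount with resets) by a two-phase scheme: one pass collects all digit positions and values, then a pair loop over consecutive digit pairs checks the sum while counting question marks in the string slice since the previous pair's end.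
import Mathlib
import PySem

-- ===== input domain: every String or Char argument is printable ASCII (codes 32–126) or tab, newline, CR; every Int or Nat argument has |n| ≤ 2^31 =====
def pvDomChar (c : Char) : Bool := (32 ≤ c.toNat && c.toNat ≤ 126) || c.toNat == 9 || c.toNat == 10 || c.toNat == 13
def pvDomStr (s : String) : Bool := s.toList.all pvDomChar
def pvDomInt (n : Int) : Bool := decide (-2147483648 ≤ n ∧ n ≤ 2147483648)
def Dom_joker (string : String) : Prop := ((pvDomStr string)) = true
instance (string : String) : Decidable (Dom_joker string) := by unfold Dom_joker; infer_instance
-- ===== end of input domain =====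

-- B replaces A's running ints/buffer/qcount state machine by a two-phase pass:
-- collect all digit positions once, then test consecutive digit pairs counting '?'
-- in the slice since the previous pair's end (objective: alternative decomposition).

-- ===== PORT A =====
-- is_int(ch) / int(ch): Python int() on a one-character string
def pyDigit? (c : Char) : Option Int := PySem.Int.ofStr? c.toString

-- the for-loop of A, state (ints, buffer, qcount); returns the function's result
def jokerLoop : List Char → List Int → String → Nat → Bool
  | [], _, _, _ => false
  | c :: rest, ints, buffer, qcount =>
    let buffer := buffer.push c
    let ints := match pyDigit? c with
      | some v => ints ++ [v]
      | none => ints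
    let qcount := if (pyDigit? c).isSome then qcount
                  else if c = '?' then qcount + 1 else qcount
    if ints.length == 2 then
      if ints.sum == 10 && qcount == 3 then true
      else jokerLoop rest [] "" 0
    else jokerLoop rest ints buffer qcount

def joker (string : String) : Bool :=
  jokerLoop string.toList [] "" 0

-- ===== PORT B =====
-- [(i, int(c)) for i, c in enumerate(string) if _digitlike(c)]
def digitList : List Char → Nat → List (Nat × Int)
  | [], _ => []
  | c :: rest, j =>
    match pyDigit? c with
    | some v => (j, v) :: digitList rest (j + 1)
    | none => digitList rest (j + 1)

-- the zip(it, it) pair loop with the running boundary;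
-- string[boundary:p2].count('?') is exact as ((s.drop b).take (p2-b)).count '?'
-- for the natural-number indices 0 ≤ boundary that B uses
def pairLoop (s : List Char) : List (Nat × Int) → Nat → Bool
  | (_, d1) :: (p2, d2) :: rest, boundary =>
    if d1 + d2 == 10 && ((s.drop boundary).take (p2 - boundary)).count '?' == 3 then true
    else pairLoop s rest (p2 + 1)
  | _, _ => false

def joker_alt (string : String) : Bool :=
  pairLoop string.toList (digitList string.toList 0) 0

-- ===== PRECONDITION & SPEC =====
def Spec_joker (string : String) (out : Bool) : Prop := out = joker_alt string
instance (string : String) (out : Bool) : Decidable (Spec_joker string out) := by unfold Spec_joker; infer_instance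

-- ===== CLAIM (what is proved, stated in full; the proofs are below) =====
def Claim_equal_joker : Prop := ∀ (string : String), Dom_joker string → Spec_joker string (joker string)

-- ===== LEMMAS AND PROOFS =====

-- first digit of a char list: relative position and value (proof-side helper)
def fd? : List Char → Option (Nat × Int)
  | [] => none
  | c :: rest =>
    match pyDigit? c with
    | some v => some (0, v)
    | none => (fd? rest).map (fun pd => (pd.1 + 1, pd.2))

theorem jokerLoop_buf_irrel : ∀ (cs : List Char) (ints : List Int) (b1 b2 : String) (q : Nat),
    jokerLoop cs ints b1 q = jokerLoop cs ints b2 q := by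
  intro cs
  induction cs with
  | nil => intro _ _ _ _; rfl
  | cons c rest ih =>
    intro ints b1 b2 q
    simp only [jokerLoop]
    cases pyDigit? c <;> split_ifs <;> first | rfl | apply ih

theorem fd?_lt : ∀ (cs : List Char) (p : Nat) (d : Int), fd? cs = some (p, d) →
    p < cs.length ∧ (pyDigit? cs[p]!).isSome := by
  intro cs
  induction cs with
  | nil => intro p d h; simp [fd?] at h
  | cons c rest ih =>
    intro p d h
    simp only [fd?] at h
    cases hc : pyDigit? c with
    | some v =>
      rw [hc] at h
      simp at h
      obtain ⟨hp, hd⟩ := h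
      subst hp
      simp [hc]
    | none =>
      rw [hc] at h
      cases hfd : fd? rest with
      | none => rw [hfd] at h; simp at h
      | some pd =>
        rw [hfd] at h
        simp at h
        obtain ⟨hp, hd⟩ := h
        obtain ⟨ih1, ih2⟩ := ih pd.1 pd.2 (by rw [hfd])
        constructor
        · simp; omega
        · have : (c :: rest)[p]! = rest[pd.1]! := by
            subst hp
            simp [List.getElem!_eq_getElem?_getD]
          rw [this]; exact ih2

theorem digitList_eq_fd : ∀ (cs : List Char) (j : Nat),
    digitList cs j = match fd? cs with
      | none => []
      | some (p, d) => (j + p, d) :: digitList (cs.drop (p + 1)) (j + p + 1) := by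
  intro cs
  induction cs with
  | nil => intro j; rfl
  | cons c rest ih =>
    intro j
    simp only [digitList, fd?]
    cases hc : pyDigit? c with
    | some v => simp
    | none =>
      cases hfd : fd? rest with
      | none =>
        simp
        rw [ih (j+1)]
        simp [hfd]
      | some pd =>
        simp
        rw [ih (j+1)]
        simp [hfd]
        constructor
        · omega
        · have : j + 1 + pd.1 + 1 = j + (pd.1 + 1) + 1 := by omega
          rw [this]

-- phase lemma: A's loop holding one digit d1 until the next digit
theorem phase1 : ∀ (cs : List Char) (buf : String) (q : Nat) (d1 : Int),
    jokerLoop cs [d1] buf q =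
      match fd? cs with
      | none => false
      | some (p, d2) =>
        if d1 + d2 == 10 && (q + (cs.take p).count '?') == 3 then true
        else jokerLoop (cs.drop (p + 1)) [] "" 0 := by
  intro cs
  induction cs with
  | nil => intro buf q d1; rfl
  | cons c rest ih =>
    intro buf q d1
    simp only [jokerLoop, fd?]
    cases hc : pyDigit? c with
    | some v =>
      simp [List.take, List.count_nil]
    | none =>
      simp only [Option.isSome_none, Bool.false_eq_true, if_false, List.length_singleton]
      by_cases hq : c = '?'
      · simp [hq]
        rw [ih]
        cases hfd : fd? rest with
        | none => simp
        | some pd =>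
          simp
          exact congrArg
            (fun n => decide (d1 + pd.2 = 10) && decide (n = 3) ||
              jokerLoop (List.drop (pd.1 + 1) rest) [] "" 0) (by omega)
      · simp [hq]
        rw [ih]
        cases hfd : fd? rest with
        | none => simp
        | some pd =>
          simp
          exact congrArg
            (fun n => decide (d1 + pd.2 = 10) && decide (q + n = 3) ||
              jokerLoop (List.drop (pd.1 + 1) rest) [] "" 0)
            (by simp [hq])

-- phase lemma: A's loop with empty state until the first digit
theorem phase0 : ∀ (cs : List Char) (buf : String) (q : Nat),
    jokerLoop cs [] buf q =
      match fd? cs with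
      | none => false
      | some (p, d1) => jokerLoop (cs.drop (p + 1)) [d1] "" (q + (cs.take p).count '?') := by
  intro cs
  induction cs with
  | nil => intro buf q; rfl
  | cons c rest ih =>
    intro buf q
    simp only [jokerLoop, fd?]
    cases hc : pyDigit? c with
    | some v =>
      simp
      exact jokerLoop_buf_irrel _ _ _ _ _
    | none =>
      simp only [Option.isSome_none, Bool.false_eq_true, if_false, List.length_nil]
      by_cases hq : c = '?'
      · simp [hq]
        rw [ih]
        cases hfd : fd? rest with
        | none => simp
        | some pd =>
          simp
          exact congrArg
            (fun n => jokerLoop (List.drop (pd.1 + 1) rest) [pd.2] "" n) (by omega)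
      · simp [hq]
        rw [ih]
        cases hfd : fd? rest with
        | none => simp
        | some pd =>
          simp
          exact congrArg
            (fun n => jokerLoop (List.drop (pd.1 + 1) rest) [pd.2] "" (q + n))
            (by simp [hq])

theorem count_take_combine (cs : List Char) (p1 p' : Nat)
    (h1 : p1 < cs.length) (hd : (pyDigit? cs[p1]!).isSome) :
    (cs.take (p1 + 1 + p')).count '?' =
      (cs.take p1).count '?' + ((cs.drop (p1 + 1)).take p').count '?' := by
  rw [List.take_add, List.count_append]
  congr 1
  rw [List.take_add_one, List.count_append]
  have hne : cs[p1]! ≠ '?' := by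
    intro e
    rw [e] at hd
    exact absurd hd (by decide)
  simp [List.getElem!_eq_getElem?_getD, List.getElem?_eq_getElem h1] at hne ⊢
  simp [hne]

-- main invariant: A's loop on the suffix s.drop b equals B's pair loop on the
-- digits of that suffix (absolute positions), with boundary b
theorem main_inv (s : List Char) : ∀ (n : Nat) (b : Nat) (cs : List Char),
    cs.length ≤ n → cs = s.drop b →
    jokerLoop cs [] "" 0 = pairLoop s (digitList cs b) b := by
  intro n
  induction n with
  | zero =>
    intro b cs hlen hcs
    have : cs = [] := List.eq_nil_of_length_eq_zero (by omega)
    subst this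
    rfl
  | succ n ih =>
    intro b cs hlen hcs
    rw [phase0]
    rw [digitList_eq_fd]
    cases hfd1 : fd? cs with
    | none => rfl
    | some pd1 =>
      obtain ⟨p1, d1⟩ := pd1
      dsimp only
      rw [phase1]
      rw [digitList_eq_fd]
      cases hfd2 : fd? (cs.drop (p1 + 1)) with
      | none => rfl
      | some pd2 =>
        obtain ⟨p', d2⟩ := pd2
        dsimp only
        obtain ⟨hp1, hd1⟩ := fd?_lt cs p1 d1 hfd1
        obtain ⟨hp', hd2⟩ := fd?_lt _ p' d2 hfd2
        simp only [pairLoop]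
        have hsb : s.drop b = cs := hcs.symm
        have habs : b + p1 + 1 + p' - b = p1 + 1 + p' := by omega
        have hcnt : ((s.drop b).take (b + p1 + 1 + p' - b)).count '?' =
            0 + (cs.take p1).count '?' + ((cs.drop (p1 + 1)).take p').count '?' := by
          rw [hsb, habs, count_take_combine cs p1 p' hp1 hd1]
          omega
        rw [← hcnt]
        split
        · rfl
        · rw [List.drop_drop]
          apply ih
          · simp only [List.length_drop]
            omega
          · rw [hcs, List.drop_drop]
            congr 1
            omega

-- ===== VERDICT (by name: the statement is the Claim_ definition above) =====
theorem joker_spec : Claim_equal_joker := by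
  intro string _
  unfold Spec_joker joker joker_alt
  exact main_inv string.toList string.toList.length 0 string.toList (le_refl _) rfl
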